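-- pv_equiv track=rewrite | github.com/hamdiranu/cobarepo | Basic Programming/Problem 2/5 - Digit Perkalian Minimum.py | digitPerkalianMinimum
-- ===== SOURCE A (Python) =====
-- def digitPerkalianMinimum(angka):
--     masuk=[]
--     for i in range(1,angka):
--         if angka%i==0 :
--             pmbagi1=(len(str(i)))
--             b=angka/i
--             pmbagi2=(len(str(int(b))))
--             masuk.append(pmbagi1+pmbagi2)
--     hasil=float('inf')
--     for i in masuk :
--         if i <= hasil :
--             hasil = i
--     if hasil == float('inf') :
--         return(2)
--     else :
--         return(hasil)
-- ===== SOURCE B (Python) =====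
-- def digitPerkalianMinimum(angka):
--     # Scan divisors only up to sqrt(angka); each small divisor i pairs with angka // i.
--     if angka < 2:
--         return 2
--     best = 1 + len(str(angka))  # the pair (1, angka)
--     i = 2
--     while i * i <= angka:
--         if angka % i == 0:
--             s = len(str(i)) + len(str(angka // i))
--             if s < best:
--                 best = s
--         i += 1
--     return best
-- ===== Notes on version B (the rewrite author's own statement) =====
-- stated objective: faster
-- what changed: B enumerates divisors only up to sqrt(angka), pairing each small divisor i with angka//i and tracking the minimum digit-length sum directly, instead of A's full scan of 1..angka-1 that builds a list and then a second minimum pass.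
import Mathlib
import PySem

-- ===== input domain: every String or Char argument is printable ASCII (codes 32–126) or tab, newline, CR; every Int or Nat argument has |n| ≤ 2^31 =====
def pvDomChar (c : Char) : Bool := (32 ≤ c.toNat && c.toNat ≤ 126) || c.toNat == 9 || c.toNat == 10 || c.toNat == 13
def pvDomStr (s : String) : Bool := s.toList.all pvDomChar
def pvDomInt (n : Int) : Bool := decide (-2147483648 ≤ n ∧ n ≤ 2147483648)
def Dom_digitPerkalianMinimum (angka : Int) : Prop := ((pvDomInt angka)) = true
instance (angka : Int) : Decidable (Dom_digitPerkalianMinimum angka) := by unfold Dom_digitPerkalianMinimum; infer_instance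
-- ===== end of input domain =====

-- B scans divisors only up to sqrt(angka), pairing each divisor i with angka // i (objective: faster).

-- ===== PORT A =====
-- Note: A computes int(angka/i) with float true division; since i divides angka and the exact
-- quotient is an integer below 2^53, the float result is exact, so int(angka/i) = angka // i.
-- 'hasil' starts at float('inf'); modelled as Option Int with none = inf ('i <= inf' is true).
def digitPerkalianMinimum (angka : Int) : Int :=
  let masuk := (PySem.List.pyRange 1 angka 1).foldl
    (fun acc i =>
      if PySem.Int.mod angka i == 0 then
        acc ++ [PySem.Str.len (PySem.Int.toStr i) +
                PySem.Str.len (PySem.Int.toStr (PySem.Int.floordiv angka i))]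
      else acc) []
  let hasil := masuk.foldl
    (fun h i => match h with
      | none => some i
      | some v => if i ≤ v then some i else some v) (none : Option Int)
  match hasil with
  | none => 2
  | some v => v

-- ===== PORT B =====
-- B's while loop: i runs over 2,3,… while i*i ≤ angka (i is a nonnegative counter, so Nat).
def pvAltLoop (angka : Int) (i : Nat) (best : Int) : Int :=
  if h : (i : Int) * i ≤ angka then
    let best' :=
      if PySem.Int.mod angka i == 0 then
        let s := PySem.Str.len (PySem.Int.toStr (i : Int)) +
                 PySem.Str.len (PySem.Int.toStr (PySem.Int.floordiv angka i))
        if s < best then s else best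
      else best
    pvAltLoop angka (i + 1) best'
  else best
termination_by angka.toNat + 1 - i
decreasing_by
  have hle : i ≤ angka.toNat := by
    rcases Nat.eq_zero_or_pos i with h0 | h1
    · omega
    · have h2 : (i : Int) ≤ (i : Int) * i :=
        le_mul_of_one_le_right (by exact_mod_cast Nat.zero_le i) (by exact_mod_cast h1)
      have := le_trans h2 h
      omega
  omega

def digitPerkalianMinimum_alt (angka : Int) : Int :=
  if angka < 2 then 2
  else pvAltLoop angka 2 (1 + PySem.Str.len (PySem.Int.toStr angka))

-- ===== PRECONDITION & SPEC =====
def Spec_digitPerkalianMinimum (angka : Int) (out : Int) : Prop := out = digitPerkalianMinimum_alt angka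
instance (angka : Int) (out : Int) : Decidable (Spec_digitPerkalianMinimum angka out) := by unfold Spec_digitPerkalianMinimum; infer_instance

-- ===== CLAIM (what is proved, stated in full; the proofs are below) =====
def Claim_equal_digitPerkalianMinimum : Prop := ∀ (angka : Int), Dom_digitPerkalianMinimum angka → Spec_digitPerkalianMinimum angka (digitPerkalianMinimum angka)

-- ===== LEMMAS AND PROOFS =====

-- digit-length sum of the divisor pair (i, n // i)
def pvG (n i : Int) : Int :=
  PySem.Str.len (PySem.Int.toStr i) + PySem.Str.len (PySem.Int.toStr (PySem.Int.floordiv n i))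

-- the values B's loop considers, as a list (mirrors pvAltLoop's recursion)
def pvSml (n : Int) (i : Nat) : List Int :=
  if h : (i : Int) * i ≤ n then
    (if PySem.Int.mod n i == 0 then [pvG n i] else []) ++ pvSml n (i + 1)
  else []
termination_by n.toNat + 1 - i
decreasing_by
  have hle : i ≤ n.toNat := by
    rcases Nat.eq_zero_or_pos i with h0 | h1
    · omega
    · have h2 : (i : Int) ≤ (i : Int) * i :=
        le_mul_of_one_le_right (by exact_mod_cast Nat.zero_le i) (by exact_mod_cast h1)
      have := le_trans h2 h
      omega
  omega

lemma pvMeasure_zero (n : Int) (i : Nat) (hk : n.toNat + 1 - i = 0) :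
    ¬ ((i : Int) * i ≤ n) := by
  intro hcon
  have h0 : (0 : Int) ≤ n := le_trans (by positivity) hcon
  have hi1 : 1 ≤ i := by omega
  have h2 : (i : Int) ≤ (i : Int) * i :=
    le_mul_of_one_le_right (by exact_mod_cast Nat.zero_le i) (by exact_mod_cast hi1)
  have h3 : (i : Int) ≤ n := le_trans h2 hcon
  omega

lemma pvAltLoop_eq_foldl_aux (n : Int) :
    ∀ (k i : Nat) (best : Int), n.toNat + 1 - i ≤ k →
      pvAltLoop n i best = (pvSml n i).foldl min best := by
  intro k
  induction k with
  | zero =>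
    intro i best hk
    have h := pvMeasure_zero n i (by omega)
    rw [pvAltLoop, pvSml]
    simp [h]
  | succ k ih =>
    intro i best hk
    by_cases h : (i : Int) * i ≤ n
    · have hle : i ≤ n.toNat := by
        rcases Nat.eq_zero_or_pos i with h0 | h1
        · omega
        · have h2 : (i : Int) ≤ (i : Int) * i :=
            le_mul_of_one_le_right (by exact_mod_cast Nat.zero_le i) (by exact_mod_cast h1)
          have := le_trans h2 h
          omega
      rw [pvAltLoop, pvSml]
      simp only [h, dite_true, dif_pos]
      by_cases hm : (PySem.Int.mod n i == 0) = true
      · simp only [hm, if_true, if_pos]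
        rw [ih (i + 1) _ (by omega)]
        have hmin : (if PySem.Str.len (PySem.Int.toStr (i : Int)) +
              PySem.Str.len (PySem.Int.toStr (PySem.Int.floordiv n i)) < best then
              PySem.Str.len (PySem.Int.toStr (i : Int)) +
              PySem.Str.len (PySem.Int.toStr (PySem.Int.floordiv n i)) else best)
            = min best (pvG n i) := by
          unfold pvG
          split_ifs with hs
          · exact (min_eq_right hs.le).symm
          · exact (min_eq_left (by omega)).symm
        rw [hmin]
        simp [List.foldl_cons]
      · simp only [hm, if_false, if_neg]
        rw [ih (i + 1) _ (by omega)]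
        simp
    · rw [pvAltLoop, pvSml]
      simp [h]

lemma pvAltLoop_eq_foldl (n : Int) (i : Nat) (best : Int) :
    pvAltLoop n i best = (pvSml n i).foldl min best :=
  pvAltLoop_eq_foldl_aux n (n.toNat + 1 - i) i best le_rfl

lemma mem_pvSml_aux (n : Int) :
    ∀ (k i : Nat) (x : Int), n.toNat + 1 - i ≤ k →
      (x ∈ pvSml n i ↔
        ∃ j : Nat, i ≤ j ∧ (j : Int) * j ≤ n ∧ PySem.Int.mod n j = 0 ∧ x = pvG n j) := by
  intro k
  induction k with
  | zero =>
    intro i x hk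
    have h := pvMeasure_zero n i (by omega)
    rw [pvSml]
    simp only [h, dite_false, dif_neg, List.not_mem_nil, false_iff]
    rintro ⟨j, hij, hjj, -, -⟩
    have hmono : (i : Int) * i ≤ (j : Int) * j := by
      have : i * i ≤ j * j := Nat.mul_le_mul hij hij
      exact_mod_cast this
    exact h (le_trans hmono hjj)
  | succ k ih =>
    intro i x hk
    by_cases h : (i : Int) * i ≤ n
    · have hle : i ≤ n.toNat := by
        rcases Nat.eq_zero_or_pos i with h0 | h1
        · omega
        · have h2 : (i : Int) ≤ (i : Int) * i :=
            le_mul_of_one_le_right (by exact_mod_cast Nat.zero_le i) (by exact_mod_cast h1)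
          have := le_trans h2 h
          omega
      rw [pvSml]
      simp only [h, dite_true, dif_pos, List.mem_append]
      rw [ih (i + 1) x (by omega)]
      constructor
      · rintro (hx | ⟨j, hij, hjj, hjm, rfl⟩)
        · by_cases hm : (PySem.Int.mod n i == 0) = true
          · simp only [hm, if_true, if_pos, List.mem_singleton] at hx
            exact ⟨i, le_rfl, h, by simpa using hm, hx⟩
          · simp [hm] at hx
        · exact ⟨j, by omega, hjj, hjm, rfl⟩
      · rintro ⟨j, hij, hjj, hjm, rfl⟩
        rcases Nat.eq_or_lt_of_le hij with heq | hlt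
        · subst heq
          left
          have hm : (PySem.Int.mod n (i : Int) == 0) = true := by simpa using hjm
          simp [hm]
        · right
          exact ⟨j, by omega, hjj, hjm, rfl⟩
    · rw [pvSml]
      simp only [h, dite_false, dif_neg, List.not_mem_nil, false_iff]
      rintro ⟨j, hij, hjj, -, -⟩
      have hmono : (i : Int) * i ≤ (j : Int) * j := by
        have : i * i ≤ j * j := Nat.mul_le_mul hij hij
        exact_mod_cast this
      exact h (le_trans hmono hjj)

lemma mem_pvSml (n : Int) (i : Nat) (x : Int) :
    x ∈ pvSml n i ↔
      ∃ j : Nat, i ≤ j ∧ (j : Int) * j ≤ n ∧ PySem.Int.mod n j = 0 ∧ x = pvG n j :=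
  mem_pvSml_aux n (n.toNat + 1 - i) i x le_rfl

lemma pvMasuk_eq (n : Int) (l acc : List Int) :
    l.foldl (fun acc i =>
        if PySem.Int.mod n i == 0 then
          acc ++ [PySem.Str.len (PySem.Int.toStr i) +
                  PySem.Str.len (PySem.Int.toStr (PySem.Int.floordiv n i))]
        else acc) acc
      = acc ++ (l.filter (fun i => PySem.Int.mod n i == 0)).map (pvG n) := by
  induction l generalizing acc with
  | nil => simp
  | cons b t ih =>
    rw [List.foldl_cons]
    by_cases h : (PySem.Int.mod n b == 0) = true
    · rw [if_pos h, ih, List.filter_cons, if_pos h, List.map_cons]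
      simp [pvG]
    · rw [if_neg h, ih, List.filter_cons, if_neg h]

lemma pvHasil_fold (l : List Int) (a : Int) :
    l.foldl (fun h i => match h with
      | none => some i
      | some v => if i ≤ v then some i else some v) (some a)
      = some (l.foldl min a) := by
  induction l generalizing a with
  | nil => rfl
  | cons b t ih =>
    have hstep : (fun (h : Option Int) (i : Int) => match h with
        | none => some i
        | some v => if i ≤ v then some i else some v) (some a) b = some (min a b) := by
      by_cases h : b ≤ a
      · simp [h, min_eq_right h]
      · have hab : a ≤ b := by omega
        simp [h, min_eq_left hab]
    simp only [List.foldl_cons, hstep, ih]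

lemma pvHasil_fold_cons (x : Int) (t : List Int) :
    (x :: t).foldl (fun h i => match h with
      | none => some i
      | some v => if i ≤ v then some i else some v) (none : Option Int)
      = some (t.foldl min x) := by
  simp only [List.foldl_cons]
  exact pvHasil_fold t x

lemma foldl_min_le_init (l : List Int) (a : Int) : l.foldl min a ≤ a := by
  induction l generalizing a with
  | nil => simp
  | cons b t ih => exact le_trans (ih (min a b)) (min_le_left a b)

lemma foldl_min_le_mem (l : List Int) (a x : Int) (hx : x ∈ l) : l.foldl min a ≤ x := by
  induction l generalizing a with
  | nil => cases hx
  | cons b t ih =>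
    rcases List.mem_cons.mp hx with rfl | h
    · exact le_trans (foldl_min_le_init t (min a x)) (min_le_right a x)
    · exact ih (min a b) h

lemma foldl_min_eq_or_mem (l : List Int) (a : Int) :
    l.foldl min a = a ∨ l.foldl min a ∈ l := by
  induction l generalizing a with
  | nil => simp
  | cons b t ih =>
    rcases ih (min a b) with h | h
    · rcases min_choice a b with h2 | h2
      · left
        rw [List.foldl_cons, h]
        exact h2
      · right
        rw [List.foldl_cons, h, h2]
        exact List.mem_cons_self ..
    · right
      rw [List.foldl_cons]
      exact List.mem_cons_of_mem _ h

lemma foldl_min_congr (a : Int) (l1 l2 : List Int)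
    (h12 : ∀ x ∈ l1, ∃ y ∈ a :: l2, y ≤ x)
    (h21 : ∀ y ∈ l2, ∃ x ∈ a :: l1, x ≤ y) :
    l1.foldl min a = l2.foldl min a := by
  apply le_antisymm
  · rcases foldl_min_eq_or_mem l2 a with h | h
    · rw [h]; exact foldl_min_le_init l1 a
    · obtain ⟨x, hx, hle⟩ := h21 _ h
      rcases List.mem_cons.mp hx with rfl | hx'
      · exact le_trans (foldl_min_le_init l1 x) hle
      · exact le_trans (foldl_min_le_mem l1 a x hx') hle
  · rcases foldl_min_eq_or_mem l1 a with h | h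
    · rw [h]; exact foldl_min_le_init l2 a
    · obtain ⟨y, hy, hle⟩ := h12 _ h
      rcases List.mem_cons.mp hy with rfl | hy'
      · exact le_trans (foldl_min_le_init l2 y) hle
      · exact le_trans (foldl_min_le_mem l2 a y hy') hle

lemma pvG_one (n : Int) : pvG n 1 = 1 + PySem.Str.len (PySem.Int.toStr n) := by
  unfold pvG
  have h1 : PySem.Int.floordiv n 1 = n := by
    rw [PySem.Int.floordiv_eq_ediv_of_pos (by norm_num)]
    exact Int.ediv_one n
  rw [h1, show PySem.Str.len (PySem.Int.toStr 1) = 1 from by decide]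

-- ===== VERDICT (by name: the statement is the Claim_ definition above) =====
theorem digitPerkalianMinimum_spec : Claim_equal_digitPerkalianMinimum := by
  intro n _
  unfold Spec_digitPerkalianMinimum digitPerkalianMinimum_alt
  by_cases hn : n < 2
  · rw [if_pos hn]
    have h0 : PySem.List.pyRange 1 n 1 = [] := PySem.List.pyRange_one_eq_nil (by omega)
    unfold digitPerkalianMinimum
    rw [h0]
    rfl
  · rw [if_neg hn]
    push_neg at hn
    set p : Int → Bool := fun i => PySem.Int.mod n i == 0 with hp
    set M2 : List Int := ((PySem.List.pyRange 2 n 1).filter p).map (pvG n) with hM2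
    -- the list A builds
    have hrange : PySem.List.pyRange 1 n 1 = 1 :: PySem.List.pyRange 2 n 1 := by
      have := PySem.List.pyRange_one_cons (show (1 : Int) < n by omega)
      simpa using this
    have hm1 : p 1 = true := by
      simp [hp, PySem.Int.mod_eq_zero_iff_dvd]
    have hmasuk : (PySem.List.pyRange 1 n 1).foldl (fun acc i =>
        if PySem.Int.mod n i == 0 then
          acc ++ [PySem.Str.len (PySem.Int.toStr i) +
                  PySem.Str.len (PySem.Int.toStr (PySem.Int.floordiv n i))]
        else acc) [] = pvG n 1 :: M2 := by
      rw [pvMasuk_eq, hrange, List.filter_cons]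
      simp [hm1, hM2, hp]
    -- B's value is the foldl-min of its list
    have hB : pvAltLoop n 2 (1 + PySem.Str.len (PySem.Int.toStr n))
        = (pvSml n 2).foldl min (pvG n 1) := by
      rw [pvAltLoop_eq_foldl, pvG_one]
    -- A's value is the foldl-min of A's list
    simp only [digitPerkalianMinimum]
    rw [hmasuk, pvHasil_fold_cons]
    show M2.foldl min (pvG n 1) = _
    rw [hB]
    apply foldl_min_congr
    · -- every divisor 2 ≤ i < n is matched by a divisor ≤ sqrt n with the same pair-sum
      intro x hx
      obtain ⟨i, hfil, rfl⟩ := List.mem_map.mp hx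
      obtain ⟨hmem, hcond⟩ := List.mem_filter.mp hfil
      obtain ⟨hi2, hin⟩ := (PySem.List.mem_pyRange_one).mp hmem
      have hdvd : i ∣ n := by
        have : PySem.Int.mod n i = 0 := by simpa [hp] using hcond
        exact (PySem.Int.mod_eq_zero_iff_dvd n i).mp this
      have hipos : (0 : Int) < i := by omega
      have hnpos : (0 : Int) < n := by omega
      by_cases hii : i * i ≤ n
      · refine ⟨pvG n i, List.mem_cons_of_mem _ ?_, le_refl _⟩
        rw [mem_pvSml]
        have hcast : ((i.toNat : Nat) : Int) = i := Int.toNat_of_nonneg hipos.le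
        refine ⟨i.toNat, by omega, by rw [hcast]; exact hii, ?_, by rw [hcast]⟩
        rw [hcast]
        exact (PySem.Int.mod_eq_zero_iff_dvd n i).mpr hdvd
      · -- pair i with c = n // i ≤ sqrt n
        set c : Int := n / i with hc
        have hci : c * i = n := Int.ediv_mul_cancel hdvd
        have hcpos : (0 : Int) < c := by nlinarith
        have hclt : c < i := by nlinarith
        have hcc : c * c ≤ n := by nlinarith
        have hcdvd : c ∣ n := ⟨i, hci.symm⟩
        have hfi : PySem.Int.floordiv n i = c := by
          rw [PySem.Int.floordiv_eq_ediv_of_pos hipos]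
        have hfc : PySem.Int.floordiv n c = i := by
          rw [PySem.Int.floordiv_eq_ediv_of_pos hcpos, ← hci,
            Int.mul_ediv_cancel_left i (ne_of_gt hcpos)]
        have hgg : pvG n c = pvG n i := by
          unfold pvG
          rw [hfi, hfc]
          ring
        refine ⟨pvG n c, ?_, hgg.le⟩
        by_cases hc1 : c = 1
        · rw [hc1]
          exact List.mem_cons_self
        · refine List.mem_cons_of_mem _ ?_
          rw [mem_pvSml]
          have hcast : ((c.toNat : Nat) : Int) = c := Int.toNat_of_nonneg hcpos.le
          refine ⟨c.toNat, by omega, by rw [hcast]; exact hcc, ?_, by rw [hcast]⟩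
          rw [hcast]
          exact (PySem.Int.mod_eq_zero_iff_dvd n c).mpr hcdvd
    · -- every divisor ≤ sqrt n lies in A's full scan
      intro y hy
      rw [mem_pvSml] at hy
      obtain ⟨j, hj2, hjj, hjm, rfl⟩ := hy
      have hj2' : (2 : Int) ≤ (j : Int) := by exact_mod_cast hj2
      have hjn : (j : Int) < n := by nlinarith
      refine ⟨pvG n j, List.mem_cons_of_mem _ ?_, le_refl _⟩
      refine List.mem_map.mpr ⟨(j : Int), List.mem_filter.mpr ⟨?_, ?_⟩, rfl⟩
      · exact (PySem.List.mem_pyRange_one).mpr ⟨hj2', hjn⟩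
      · simp [hp, hjm]
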